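-- pv_equiv track=rewrite | github.com/ssangervasi/python-playground | GridFiller/util.py | loopTest
-- ===== SOURCE A (Python) =====
-- def loopTest(breadth, depth):
-- 	results = []
-- 	arr = [0 for i in range(breadth)]
-- 	active = 0
-- 	back = 0
-- 	while active > -1:
-- 		if active >= breadth:
-- 			active -= 1
-- 			back = 1
-- 			continue
--
-- 		arr[active] += back
-- 		if arr[active] == depth:
-- 			arr[active] = 0
-- 			active -= 1
-- 			back = 1
-- 			continue
--
-- 		active += 1
-- 		back = 0
-- 		results.append(''.join(str(max(val, 0)) for val in arr))
--
-- 	return results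
-- ===== SOURCE B (Python) =====
-- def loopTest(breadth, depth):
--     # Bottom-up suffix DP: S(pos) = list of suffix-strings the DFS emits below
--     # position pos; built iteratively from pos = n-1 down to 0, no backtracking state.
--     n = breadth if breadth > 0 else 0
--     k = depth if depth > 0 else 0
--     if n == 0 or k == 0:
--         return []
--     suffixes = []
--     for pos in range(n - 1, -1, -1):
--         pad = "0" * (n - pos - 1)
--         nxt = []
--         for d in range(k):
--             ds = str(d)
--             nxt.append(ds + pad)
--             for t in suffixes:
--                 nxt.append(ds + t)
--         suffixes = nxt
--     return suffixes
-- ===== Notes on version B (the rewrite author's own statement) =====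
-- stated objective: faster
-- what changed: Replaces the explicit active/back odometer that re-joins the whole digit array after every step with a bottom-up dynamic program over suffix lists: S(pos) is built from S(pos+1) by prepending each digit, so each emitted string is one concatenation of a shared suffix instead of an O(n) re-join.
import Mathlib
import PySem

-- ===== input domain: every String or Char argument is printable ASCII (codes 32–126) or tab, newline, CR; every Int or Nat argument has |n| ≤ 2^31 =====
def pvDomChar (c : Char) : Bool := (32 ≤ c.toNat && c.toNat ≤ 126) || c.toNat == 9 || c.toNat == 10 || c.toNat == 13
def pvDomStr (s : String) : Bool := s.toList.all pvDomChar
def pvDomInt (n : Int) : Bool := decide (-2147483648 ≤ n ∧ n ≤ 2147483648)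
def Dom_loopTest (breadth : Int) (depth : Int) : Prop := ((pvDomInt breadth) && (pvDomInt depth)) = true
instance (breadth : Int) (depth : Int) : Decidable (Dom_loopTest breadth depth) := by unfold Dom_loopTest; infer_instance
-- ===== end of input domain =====

-- B replaces A's active/back odometer by a bottom-up suffix-list dynamic program
-- (one concatenation per emitted string instead of a full per-state re-join); objective: faster.

-- ===== PORT A =====
-- A's while-loop, step for step; the Nat argument is fuel (the loop has no structural
-- measure). `fuelC` below bounds its iteration count, so inside Pre_loopTest the fuel
-- never runs out and the `none` (out-of-fuel / IndexError) branches are never taken.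
def loopA (depth breadth : Int) : Nat → List Int → Int → Int → List String → Option (List String)
  | 0, _, _, _, _ => none
  | f + 1, arr, active, back, results =>
    if active > -1 then
      if active ≥ breadth then
        loopA depth breadth f arr (active - 1) 1 results
      else
        match PySem.List.pyGet? arr active with   -- arr[active] (none = IndexError)
        | none => none
        | some v =>
          if v + back == depth then
            loopA depth breadth f ((arr.set active.toNat (v + back)).set active.toNat 0)
              (active - 1) 1 results
          else
            loopA depth breadth f (arr.set active.toNat (v + back)) (active + 1) 0
              (results ++ [PySem.Str.join ""
                ((arr.set active.toNat (v + back)).map (fun w => PySem.Int.toStr (max w 0)))])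
    else some results

-- fuel bound: iterations A's loop needs to come back up from a level g steps above the bottom
def fuelC (depth : Int) : Nat → Nat
  | 0 => 1
  | g + 1 => depth.toNat * (1 + fuelC depth g) + 1

def loopTest (breadth : Int) (depth : Int) : List String :=
  match loopA depth breadth (fuelC depth breadth.toNat + 1)
      (List.replicate breadth.toNat 0) 0 0 [] with
  | some r => r
  | none => []

-- ===== PORT B =====
-- Source B's backward loop `for pos in range(n-1,-1,-1)` as recursion on the number m of
-- already-processed levels (then pos = n-1-m and the pad "0"*(n-pos-1) has length m).
def buildB (k : Nat) : Nat → List String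
  | 0 => []
  | m + 1 =>
    (List.range k).foldl
      (fun nxt (d : Nat) =>
        (nxt ++ [PySem.Int.toStr (d : Int) ++ String.ofList (List.replicate m '0')])
          ++ (buildB k m).map (fun t => PySem.Int.toStr (d : Int) ++ t))
      []

def loopTest_alt (breadth : Int) (depth : Int) : List String :=
  -- n = breadth if breadth > 0 else 0 (= breadth.toNat), k likewise; early [] as in Source B
  if breadth.toNat = 0 ∨ depth.toNat = 0 then [] else buildB depth.toNat breadth.toNat

-- ===== PRECONDITION & SPEC =====
-- Pre_ excludes breadth > 0 with depth < 0: there A's loop can never reach depth and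
-- loops forever (A returns no value), while B naturally returns [].
def Pre_loopTest (breadth : Int) (depth : Int) : Prop := 0 ≤ depth ∨ breadth ≤ 0
instance (breadth : Int) (depth : Int) : Decidable (Pre_loopTest breadth depth) := by
  unfold Pre_loopTest; infer_instance
def pvWitness_loopTest : Int × Int := (3, 2)

def Spec_loopTest (breadth : Int) (depth : Int) (out : List String) : Prop := out = loopTest_alt breadth depth
instance (breadth : Int) (depth : Int) (out : List String) : Decidable (Spec_loopTest breadth depth out) := by unfold Spec_loopTest; infer_instance

-- ===== CLAIM (what is proved, stated in full; the proofs are below) =====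
def Claim_equal_loopTest : Prop := ∀ (breadth : Int) (depth : Int), Dom_loopTest breadth depth → Pre_loopTest breadth depth → Spec_loopTest breadth depth (loopTest breadth depth)

-- ===== LEMMAS AND PROOFS =====

-- the string of the first p cells of arr (the common prefix of everything the subtree
-- of A's loop below level p emits)
def prefStr (l : List Int) (p : Nat) : String :=
  PySem.Str.join "" ((l.take p).map fun v => PySem.Int.toStr v)

lemma intercalate_nil_sep (l : List (List Char)) : List.intercalate [] l = l.flatten := by
  induction l with
  | nil => rfl
  | cons x xs ih =>
    cases xs with
    | nil => simp [List.intercalate]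
    | cons y ys =>
      rw [List.intercalate] at ih ⊢
      simp only [List.intersperse] at ih ⊢
      simp_all

lemma toList_joinEmpty (parts : List String) :
    (PySem.Str.join "" parts).toList = (parts.map String.toList).flatten := by
  rw [PySem.Str.toList_join]
  simp [PySem.Chars.join, intercalate_nil_sep]

lemma flatten_replicate_zeroChars (g : Nat) :
    (List.replicate g (['0'] : List Char)).flatten = List.replicate g '0' := by
  induction g with
  | zero => rfl
  | succ n ih => simp [List.replicate_succ, ih]

-- joining all-nonnegative cells drops the max
lemma joinMax_eq (l : List Int) (h : ∀ v ∈ l, 0 ≤ v) :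
    PySem.Str.join "" (l.map fun w => PySem.Int.toStr (max w 0)) =
      PySem.Str.join "" (l.map fun w => PySem.Int.toStr w) := by
  congr 1
  exact List.map_congr_left (fun v hv => by rw [max_eq_left (h v hv)])

lemma foldl_shape {α β : Type} (f g : α → List β) (l : List α) :
    ∀ (init : List β), l.foldl (fun acc d => (acc ++ f d) ++ g d) init
      = init ++ l.flatMap (fun d => f d ++ g d) := by
  induction l with
  | nil => simp
  | cons x xs ih => intro init; simp [ih, List.flatMap]

lemma buildB_succ (k m : Nat) :
    buildB k (m + 1) = (List.range k).flatMap (fun (d : Nat) =>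
      (PySem.Int.toStr (d : Int) ++ String.ofList (List.replicate m '0'))
        :: (buildB k m).map (fun t => PySem.Int.toStr (d : Int) ++ t)) := by
  rw [buildB]
  rw [foldl_shape (fun d : Nat => [PySem.Int.toStr (d : Int) ++ String.ofList (List.replicate m '0')])
      (fun d : Nat => (buildB k m).map (fun t => PySem.Int.toStr (d : Int) ++ t))]
  simp

-- what A's join of `arr.set p c` is, split as prefix ++ digit ++ zero-pad
lemma emitA_eq (arr : List Int) (p g : Nat) (c : Int) (hc : 0 ≤ c)
    (hp : p < arr.length) (hdrop : arr.drop (p + 1) = List.replicate g 0)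
    (hnn : ∀ v ∈ arr, 0 ≤ v) :
    PySem.Str.join "" ((arr.set p c).map (fun w => PySem.Int.toStr (max w 0)))
      = prefStr arr p ++ (PySem.Int.toStr c ++ String.ofList (List.replicate g '0')) := by
  have hnn' : ∀ v ∈ arr.set p c, 0 ≤ v := by
    intro v hv
    rcases List.mem_or_eq_of_mem_set hv with h | rfl
    · exact hnn v h
    · exact hc
  rw [joinMax_eq _ hnn']
  apply String.toList_inj.mp
  have hset : arr.set p c = arr.take p ++ c :: List.replicate g 0 := by
    rw [List.set_eq_take_append_cons_drop, if_pos hp, hdrop]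
  rw [hset]
  simp only [String.toList_append, toList_joinEmpty, prefStr, List.map_append, List.map_cons,
    List.map_map, List.flatten_append, List.flatten_cons, List.map_replicate,
    PySem.Int.toList_toStr]
  have h0 : PySem.Int.toChars (0 : Int) = ['0'] := by decide
  simp [h0, flatten_replicate_zeroChars, Function.comp]

lemma prefStr_set (arr : List Int) (p : Nat) (c : Int) :
    prefStr (arr.set p c) p = prefStr arr p := by
  unfold prefStr
  rw [List.take_set, List.set_eq_of_length_le (by simp)]

lemma prefStr_set_succ (arr : List Int) (p : Nat) (c : Int) (hp : p < arr.length) :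
    prefStr (arr.set p c) (p + 1) = prefStr arr p ++ PySem.Int.toStr c := by
  have htake : (arr.set p c).take (p + 1) = arr.take p ++ [c] := by
    rw [List.set_eq_take_append_cons_drop, if_pos hp, List.take_append]
    simp [List.take_take, List.length_take, Nat.le_of_lt hp, Nat.min_eq_left]
  unfold prefStr
  rw [htake]
  apply String.toList_inj.mp
  simp only [toList_joinEmpty, String.toList_append, List.map_append, List.map_take]
  simp [PySem.Chars.join, intercalate_nil_sep, PySem.Int.toList_toStr]

lemma seg (depth breadth : Int) (hk : 0 ≤ depth) :
    ∀ g p : Nat, ∀ (arr : List Int) (fuel : Nat) (acc : List String),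
      arr.length = breadth.toNat → (p : Int) + (g : Int) = breadth →
      arr.drop p = List.replicate g 0 →
      (∀ v ∈ arr, 0 ≤ v) →
      loopA depth breadth (fuel + fuelC depth g) arr (p : Int) 0 acc
        = loopA depth breadth fuel arr ((p : Int) - 1) 1
            (acc ++ (buildB depth.toNat g).map (fun t => prefStr arr p ++ t)) := by
  intro g
  induction g with
  | zero =>
    intro p arr fuel acc hlen hpB hdrop hnn
    have hpB' : (p : Int) ≥ breadth := by omega
    show loopA depth breadth (fuel + 1) arr (p : Int) 0 acc = _
    rw [loopA]
    rw [if_pos (by omega : (p : Int) > -1), if_pos hpB']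
    simp [buildB]
  | succ g ih =>
    intro p arr fuel acc hlen hpB hdrop hnn
    have hpb : (p : Int) < breadth := by omega
    have hplen : p < arr.length := by omega
    have inner : ∀ m : Nat, ∀ (c : Nat) (b : Int) (arr : List Int) (fuel : Nat) (acc : List String),
        c + m = depth.toNat → (b = 0 ∨ b = 1) →
        arr.length = breadth.toNat →
        arr.drop (p + 1) = List.replicate g 0 →
        (∀ v ∈ arr, 0 ≤ v) →
        arr[p]? = some ((c : Int) - b) →
        loopA depth breadth (fuel + (m * (1 + fuelC depth g) + 1)) arr (p : Int) b acc
          = loopA depth breadth fuel (arr.set p 0) ((p : Int) - 1) 1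
              (acc ++ ((List.range' c m).flatMap (fun (d : Nat) =>
                  (PySem.Int.toStr (d : Int) ++ String.ofList (List.replicate g '0'))
                    :: (buildB depth.toNat g).map (fun t => PySem.Int.toStr (d : Int) ++ t))).map
                (fun t => prefStr arr p ++ t)) := by
      intro m
      induction m with
      | zero =>
        intro c b arr fuel acc hcm hb hlen' hdrop' hnn' hget
        have hceq : (c : Int) = depth := by
          have : c = depth.toNat := by omega
          subst this; omega
        rw [show fuel + (0 * (1 + fuelC depth g) + 1) = fuel + 1 from by ring]
        rw [loopA]
        rw [if_pos (by omega : (p : Int) > -1), if_neg (by omega : ¬ (p : Int) ≥ breadth)]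
        rw [show PySem.List.pyGet? arr (p : Int) = some ((c : Int) - b) from by
          simpa [PySem.List.pyGet?_natCast] using hget]
        dsimp only
        rw [if_pos (by rw [beq_iff_eq]; omega)]
        have hpt : ((p : Int)).toNat = p := by simp
        rw [hpt, List.set_set]
        simp
      | succ m ihm =>
        intro c b arr fuel acc hcm hb hlen' hdrop' hnn' hget
        have hclt : (c : Int) < depth := by omega
        have hplen' : p < arr.length := by omega
        set C := fuelC depth g with hC
        rw [show fuel + ((m + 1) * (1 + C) + 1) = ((fuel + (m * (1 + C) + 1)) + C) + 1 from by ring]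
        rw [loopA]
        rw [if_pos (by omega : (p : Int) > -1), if_neg (by omega : ¬ (p : Int) ≥ breadth)]
        rw [show PySem.List.pyGet? arr (p : Int) = some ((c : Int) - b) from by
          simpa [PySem.List.pyGet?_natCast] using hget]
        dsimp only
        rw [if_neg (by rw [beq_iff_eq]; omega)]
        have hpt : ((p : Int)).toNat = p := by simp
        rw [hpt]
        have hcb : (c : Int) - b + b = (c : Int) := by ring
        rw [hcb]
        set arr1 := arr.set p (c : Int) with harr1
        have hlen1 : arr1.length = breadth.toNat := by simp [harr1, hlen']
        have hdrop1 : arr1.drop (p + 1) = List.replicate g 0 := by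
          rw [harr1, List.drop_set, if_pos (by omega)]; exact hdrop'
        have hnn1 : ∀ v ∈ arr1, 0 ≤ v := by
          intro v hv
          rcases List.mem_or_eq_of_mem_set hv with h | rfl
          · exact hnn' v h
          · omega
        -- descend: outer induction hypothesis at level p+1
        have hstep := ih (p + 1) arr1 (fuel + (m * (1 + C) + 1))
          (acc ++ [PySem.Str.join "" (arr1.map (fun w => PySem.Int.toStr (max w 0)))])
          hlen1 (by push_cast; omega) (by simpa using hdrop1) hnn1
        rw [show ((p : Int) + 1) = (((p + 1 : Nat) : Int)) from by push_cast; ring]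
        rw [hstep]
        rw [show (((p + 1 : Nat) : Int)) - 1 = (p : Int) from by push_cast; ring]
        -- continue at level p with the next digit
        have hget1 : arr1[p]? = some ((c + 1 : Nat) - (1 : Int)) := by
          rw [harr1, List.getElem?_set_self hplen']
          congr 1; push_cast; ring
        have hcont := ihm (c + 1) 1 arr1 fuel
          ((acc ++ [PySem.Str.join "" (arr1.map (fun w => PySem.Int.toStr (max w 0)))])
            ++ (buildB depth.toNat g).map (fun t => prefStr arr1 (p + 1) ++ t))
          (by omega) (Or.inr rfl) hlen1 hdrop1 hnn1 hget1
        rw [hcont]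
        rw [harr1, List.set_set]
        -- now only the accumulated lists differ syntactically
        congr 1
        rw [List.range'_succ, List.flatMap_cons]
        rw [emitA_eq arr p g (c : Int) (by omega) hplen' hdrop' hnn']
        rw [prefStr_set arr p (c : Int), prefStr_set_succ arr p (c : Int) hplen']
        simp [List.map_map, Function.comp, List.append_assoc, String.append_assoc]
    -- the whole level p = digits 0..depth-1, then one step up
    have hdrop1 : arr.drop (p + 1) = List.replicate g 0 := by
      have := congrArg (List.drop 1) hdrop
      simpa [List.drop_drop, Nat.add_comm, List.replicate_succ] using this
    have hget : arr[p]? = some ((0 : Nat) - (0 : Int)) := by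
      have h0 : (arr.drop p)[0]? = some 0 := by rw [hdrop]; simp [List.replicate_succ]
      rw [List.getElem?_drop] at h0
      simpa using h0
    have h := inner depth.toNat 0 0 arr fuel acc (by omega) (Or.inl rfl) hlen hdrop1 hnn hget
    rw [show fuelC depth (g + 1) = depth.toNat * (1 + fuelC depth g) + 1 from rfl]
    have hset0 : arr.set p 0 = arr := by
      apply List.ext_getElem?
      intro i
      rw [List.getElem?_set]
      by_cases h1 : p = i
      · subst h1
        rw [if_pos rfl, if_pos hplen, hget]
        norm_num
      · rw [if_neg h1]
    rw [h, hset0, buildB_succ, List.range_eq_range']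

-- ===== VERDICT (by name: the statement is the Claim_ definition above) =====
theorem loopTest_spec : Claim_equal_loopTest := by
  intro breadth depth _hdom hpre
  unfold Spec_loopTest loopTest loopTest_alt
  by_cases hb : 0 < breadth
  · have hk : 0 ≤ depth := by
      rcases hpre with h | h
      · exact h
      · omega
    have hseg := seg depth breadth hk breadth.toNat 0 (List.replicate breadth.toNat 0) 1 []
      (by simp) (by simp; omega) (by simp)
      (by intro v hv; rw [List.eq_of_mem_replicate hv])
    rw [show fuelC depth breadth.toNat + 1 = 1 + fuelC depth breadth.toNat from by ring]
    rw [show ((0 : Nat) : Int) = 0 from rfl] at hseg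
    rw [hseg]
    rw [loopA]
    rw [if_neg (by omega : ¬ ((0 : Int) - 1 > -1))]
    have hj : PySem.Str.join "" ([] : List String) = "" := by
      apply String.toList_inj.mp
      simp [toList_joinEmpty]
    by_cases hd0 : depth.toNat = 0
    · rw [if_pos (Or.inr hd0), hd0]
      have hb0 : buildB 0 breadth.toNat = [] := by
        cases breadth.toNat with
        | zero => rfl
        | succ m => rfl
      simp [hb0]
    · rw [if_neg (by omega : ¬ (breadth.toNat = 0 ∨ depth.toNat = 0))]
      simp [prefStr, hj, String.empty_append]
  · have h0 : breadth.toNat = 0 := by omega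
    rw [h0]
    rw [show fuelC depth 0 + 1 = 1 + 1 from rfl]
    rw [loopA]
    rw [if_pos (by omega : (0 : Int) > -1), if_pos (by omega : (0 : Int) ≥ breadth)]
    rw [loopA]
    rw [if_neg (by omega : ¬ ((0 : Int) - 1 > -1))]
    simp [h0]
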